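-- pv_equiv track=rewrite | github.com/ivanteofilovic-dt/invoice-coding | scripts/eval_accuracy.py | compare_prediction
-- ===== SOURCE A (Python) =====
-- FIELD_MAP: dict[str, str] = {
--     "account": "ACCOUNT",
--     "cost_center": "DEPARTMENT",
--     "product_code": "PRODUCT",
--     "ic": "IC",
--     "project": "PROJECT",
--     "gl_system": "SYSTEM",
--     "reserve": "RESERVE",
-- }
--
-- def _norm(value: str | None) -> str:
--     """Strip whitespace and uppercase for case-insensitive comparison."""
--     if not value:
--         return ""
--     return str(value).strip().upper()
--
-- FieldResult = bool | None  # True=correct, False=wrong, None=no GT value to compare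
--
-- def compare_prediction(
--     suggestion: dict,
--     gt_fields: dict[str, set[str]],
-- ) -> dict[str, FieldResult]:
--     """Check each coding field in the suggestion against GT.
--
--     An invoice is considered *correct* for a field when ANY predicted
--     journal-line value appears in the set of GT values for that field.
--     Returns ``None`` for fields where the GT has no non-empty values.
--     """
--     journal_lines: list[dict] = suggestion.get("journal_lines") or []
--     results: dict[str, FieldResult] = {}
--
--     for pred_field, gl_col in FIELD_MAP.items():
--         gt_vals = gt_fields.get(gl_col, set())
--         if not gt_vals:
--             results[pred_field] = None
--             continue
--
--         predicted_vals = {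
--             _norm(jl.get(pred_field))
--             for jl in journal_lines
--             if _norm(jl.get(pred_field))
--         }
--
--         results[pred_field] = bool(predicted_vals & gt_vals) if predicted_vals else False
--
--     return results
-- ===== SOURCE B (Python) =====
-- FIELD_MAP: dict[str, str] = {
--     "account": "ACCOUNT",
--     "cost_center": "DEPARTMENT",
--     "product_code": "PRODUCT",
--     "ic": "IC",
--     "project": "PROJECT",
--     "gl_system": "SYSTEM",
--     "reserve": "RESERVE",
-- }
--
--
-- def _norm(value):
--     if not value:
--         return ""
--     return str(value).strip().upper()
--
--
-- def compare_prediction(suggestion, gt_fields):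
--     """Single pass over the journal lines with per-field hit flags.
--
--     No predicted-value sets and no set intersection are built: a field is
--     correct iff some line carries a non-empty normalized value that lies in
--     the field's GT set (a field with predictions but no hit and a field with
--     no predictions both come out False, so one flag per field suffices);
--     fields whose GT set is empty are None.
--     """
--     journal_lines = suggestion.get("journal_lines") or []
--     gt = {f: gt_fields.get(col, set()) for f, col in FIELD_MAP.items()}
--     hit = {f: False for f in FIELD_MAP}
--     for jl in journal_lines:
--         for f in FIELD_MAP:
--             v = _norm(jl.get(f))
--             hit[f] = hit[f] or (bool(v) and v in gt[f])
--     return {f: (hit[f] if gt[f] else None) for f in FIELD_MAP}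
-- ===== Notes on version B (the rewrite author's own statement) =====
-- stated objective: alternative
-- what changed: B replaces A's per-field construction of a predicted-value set and a set intersection by a single pass over the journal lines that maintains one boolean hit flag per field (the no-predictions False case coincides with the no-hit False case, so sets are unnecessary), then emits results from the flags in FIELD_MAP order.
import Mathlib
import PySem

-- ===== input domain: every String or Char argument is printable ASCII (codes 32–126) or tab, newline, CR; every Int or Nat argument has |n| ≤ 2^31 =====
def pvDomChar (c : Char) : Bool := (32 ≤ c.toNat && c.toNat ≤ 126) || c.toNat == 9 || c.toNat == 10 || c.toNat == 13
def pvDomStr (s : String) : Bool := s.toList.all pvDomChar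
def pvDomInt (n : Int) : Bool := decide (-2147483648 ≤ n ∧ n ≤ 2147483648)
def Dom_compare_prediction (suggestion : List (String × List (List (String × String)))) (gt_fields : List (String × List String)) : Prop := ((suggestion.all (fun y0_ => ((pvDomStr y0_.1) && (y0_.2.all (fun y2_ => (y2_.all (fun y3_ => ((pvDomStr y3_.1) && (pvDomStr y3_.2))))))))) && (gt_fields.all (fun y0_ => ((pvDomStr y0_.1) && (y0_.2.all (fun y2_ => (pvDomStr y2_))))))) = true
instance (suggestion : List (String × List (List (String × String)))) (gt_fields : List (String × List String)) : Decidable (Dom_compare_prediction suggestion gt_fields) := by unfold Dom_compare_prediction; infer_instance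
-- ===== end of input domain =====

-- B replaces A's per-field predicted-value set and set intersection by one pass over the
-- journal lines maintaining a boolean hit flag per field (objective: alternative decomposition).

-- shared module context: FIELD_MAP and _norm
def pvFieldMap : List (String × String) :=
  [("account", "ACCOUNT"), ("cost_center", "DEPARTMENT"), ("product_code", "PRODUCT"),
   ("ic", "IC"), ("project", "PROJECT"), ("gl_system", "SYSTEM"), ("reserve", "RESERVE")]

-- _norm: '' for None/'' else str(value).strip().upper()  (exact on the ASCII domain via PySem.Str)
def pvNorm (v : Option String) : String :=
  match v with
  | none => ""
  | some s => if s == "" then "" else PySem.Str.upper (PySem.Str.strip s)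

-- dict.get(k) on an association list: first match
def pvGet? {α : Type} (d : List (String × α)) (k : String) : Option α :=
  (d.find? (fun p => p.1 == k)).map Prod.snd

-- dict.get(k, dflt)
def pvGetD {α : Type} (d : List (String × α)) (k : String) (dflt : α) : α :=
  (pvGet? d k).getD dflt

-- ===== PORT A =====
def compare_prediction (suggestion : List (String × List (List (String × String)))) (gt_fields : List (String × List String)) : List (String × Option Bool) :=
  -- suggestion.get("journal_lines") or []  ('or []' turns a missing key into []; an empty list stays [])
  let journal_lines : List (List (String × String)) := pvGetD suggestion "journal_lines" []
  pvFieldMap.foldl (fun (results : List (String × Option Bool)) pc =>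
    let gt_vals : List String := pvGetD gt_fields pc.2 []
    if gt_vals.isEmpty then results ++ [(pc.1, none)]
    else
      let predicted : PySem.Set String := journal_lines.foldl (fun acc jl =>
        if pvNorm (pvGet? jl pc.1) != "" then PySem.Set.add acc (pvNorm (pvGet? jl pc.1)) else acc)
        PySem.Set.empty
      results ++ [(pc.1, some (if predicted.isEmpty then false else !(PySem.Set.inter predicted gt_vals).isEmpty))])
    []

-- ===== PORT B =====
-- body of B's inner 'for f in FIELD_MAP' loop, for one journal line jl
def pvHitStep (gt : PySem.Dict String (List String)) (h : PySem.Dict String Bool) (jl : List (String × String)) : PySem.Dict String Bool :=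
  pvFieldMap.foldl (fun h pc =>
    h.insert pc.1 (h.getD pc.1 false ||
      (pvNorm (pvGet? jl pc.1) != "" && (gt.getD pc.1 []).contains (pvNorm (pvGet? jl pc.1)))))
    h

def compare_prediction_alt (suggestion : List (String × List (List (String × String)))) (gt_fields : List (String × List String)) : List (String × Option Bool) :=
  let journal_lines : List (List (String × String)) := pvGetD suggestion "journal_lines" []
  let gt : PySem.Dict String (List String) :=
    pvFieldMap.foldl (fun d pc => d.insert pc.1 (pvGetD gt_fields pc.2 [])) PySem.Dict.empty
  let hit0 : PySem.Dict String Bool :=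
    pvFieldMap.foldl (fun d pc => d.insert pc.1 false) PySem.Dict.empty
  let hit : PySem.Dict String Bool := journal_lines.foldl (pvHitStep gt) hit0
  pvFieldMap.map (fun pc =>
    (pc.1, if (gt.getD pc.1 []).isEmpty then none else some (hit.getD pc.1 false)))

-- ===== PRECONDITION & SPEC =====
def Spec_compare_prediction (suggestion : List (String × List (List (String × String)))) (gt_fields : List (String × List String)) (out : List (String × Option Bool)) : Prop := out = compare_prediction_alt suggestion gt_fields
instance (suggestion : List (String × List (List (String × String)))) (gt_fields : List (String × List String)) (out : List (String × Option Bool)) : Decidable (Spec_compare_prediction suggestion gt_fields out) := by unfold Spec_compare_prediction; infer_instance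

-- ===== CLAIM (what is proved, stated in full; the proofs are below) =====
def Claim_equal_compare_prediction : Prop := ∀ (suggestion : List (String × List (List (String × String)))) (gt_fields : List (String × List String)), Dom_compare_prediction suggestion gt_fields → Spec_compare_prediction suggestion gt_fields (compare_prediction suggestion gt_fields)

-- ===== LEMMAS AND PROOFS =====

-- a fold of per-key inserts leaves a key it never touches alone
theorem pv_foldl_insert_getD_of_not_mem (fm : List (String × String)) (c : String → Bool)
    (h : PySem.Dict String Bool) (f : String) (hf : f ∉ fm.map Prod.fst) :
    (fm.foldl (fun h pc => h.insert pc.1 (h.getD pc.1 false || c pc.1)) h).getD f false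
      = h.getD f false := by
  induction fm generalizing h with
  | nil => rfl
  | cons p tl ih =>
      simp only [List.map_cons, List.mem_cons, not_or] at hf
      simp only [List.foldl_cons]
      rw [ih _ hf.2, PySem.Dict.getD_insert, if_neg hf.1]

-- entry f of the inner per-field fold: its own flag gets or-ed with c f, once
theorem pv_foldl_insert_getD (fm : List (String × String)) (c : String → Bool)
    (h : PySem.Dict String Bool) (f : String) (hf : f ∈ fm.map Prod.fst)
    (hnd : (fm.map Prod.fst).Nodup) :
    (fm.foldl (fun h pc => h.insert pc.1 (h.getD pc.1 false || c pc.1)) h).getD f false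
      = (h.getD f false || c f) := by
  induction fm generalizing h with
  | nil => cases hf
  | cons p tl ih =>
      simp only [List.map_cons, List.nodup_cons] at hnd
      simp only [List.foldl_cons]
      by_cases hfp : f = p.1
      · subst hfp
        rw [pv_foldl_insert_getD_of_not_mem _ _ _ _ hnd.1,
            PySem.Dict.getD_insert, if_pos rfl]
      · have hf' : f ∈ tl.map Prod.fst := by
          simp only [List.map_cons, List.mem_cons] at hf
          exact hf.resolve_left hfp
        rw [ih _ hf' hnd.2, PySem.Dict.getD_insert, if_neg hfp]

-- entry f of the outer fold over the journal lines is the or-fold of the per-line conditions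
theorem pv_outer_getD {α : Type} (ls : List α) (F : PySem.Dict String Bool → α → PySem.Dict String Bool)
    (f : String) (c : α → Bool)
    (hF : ∀ h jl, (F h jl).getD f false = (h.getD f false || c jl)) :
    ∀ h : PySem.Dict String Bool,
      (ls.foldl F h).getD f false = ls.foldl (fun b jl => b || c jl) (h.getD f false) := by
  induction ls with
  | nil => intro h; rfl
  | cons jl tl ih => intro h; simp only [List.foldl_cons]; rw [ih, hF]

theorem pv_foldl_or {α : Type} (c : α → Bool) (ls : List α) (b : Bool) :
    ls.foldl (fun b jl => b || c jl) b = (b || ls.any c) := by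
  induction ls generalizing b with
  | nil => simp
  | cons x tl ih => simp [ih, Bool.or_assoc]

-- membership in A's predicted-value set: exactly the non-empty normalized line values
theorem pv_mem_buildSet (f : String) (ls : List (List (String × String))) :
    ∀ (s : PySem.Set String) (x : String),
      x ∈ ls.foldl (fun acc jl =>
          if pvNorm (pvGet? jl f) != "" then PySem.Set.add acc (pvNorm (pvGet? jl f)) else acc) s
        ↔ x ∈ s ∨ ∃ jl ∈ ls, pvNorm (pvGet? jl f) = x ∧ x ≠ "" := by
  induction ls with
  | nil => intro s x; simp
  | cons jl tl ih =>
      intro s x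
      simp only [List.foldl_cons, List.mem_cons]
      rw [ih]
      by_cases hv : pvNorm (pvGet? jl f) = ""
      · simp only [hv, bne_self_eq_false, Bool.false_eq_true, if_false]
        constructor
        · rintro (h | ⟨jl', hjl', hx, hne⟩)
          · exact Or.inl h
          · exact Or.inr ⟨jl', Or.inr hjl', hx, hne⟩
        · rintro (h | ⟨jl', (h' | h'), hx, hne⟩)
          · exact Or.inl h
          · exact absurd (h' ▸ hv) (hx ▸ hne)
          · exact Or.inr ⟨jl', h', hx, hne⟩
      · simp only [bne_iff_ne, ne_eq, hv, not_false_eq_true, if_true, PySem.Set.mem_add]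
        constructor
        · rintro ((h | h) | h)
          · exact Or.inl h
          · subst h; exact Or.inr ⟨jl, Or.inl rfl, rfl, hv⟩
          · obtain ⟨jl', hjl', hx⟩ := h; exact Or.inr ⟨jl', Or.inr hjl', hx⟩
        · rintro (h | ⟨jl', (h' | h'), hx, hne⟩)
          · exact Or.inl (Or.inl h)
          · subst h'; exact Or.inl (Or.inr hx.symm)
          · exact Or.inr ⟨jl', h', hx, hne⟩

-- A's per-field value (set built, then intersected) equals B's any-hit scan
theorem pv_A_field (f : String) (g : List String) (ls : List (List (String × String))) :
    (if (ls.foldl (fun acc jl =>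
          if pvNorm (pvGet? jl f) != "" then PySem.Set.add acc (pvNorm (pvGet? jl f)) else acc)
          PySem.Set.empty).isEmpty
      then false
      else !(PySem.Set.inter (ls.foldl (fun acc jl =>
          if pvNorm (pvGet? jl f) != "" then PySem.Set.add acc (pvNorm (pvGet? jl f)) else acc)
          PySem.Set.empty) g).isEmpty)
    = ls.any (fun jl => pvNorm (pvGet? jl f) != "" && g.contains (pvNorm (pvGet? jl f))) := by
  rw [Bool.eq_iff_iff]
  constructor
  · intro h
    split at h
    · cases h
    · rw [Bool.not_eq_eq_eq_not, Bool.not_true, List.isEmpty_eq_false_iff_exists_mem] at h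
      obtain ⟨x, hx⟩ := h
      have hx' : x ∈ (ls.foldl (fun acc jl =>
          if pvNorm (pvGet? jl f) != "" then PySem.Set.add acc (pvNorm (pvGet? jl f)) else acc)
          PySem.Set.empty : PySem.Set String) ∧ x ∈ g := by
        simpa [PySem.Set.inter] using hx
      obtain ⟨jl, hjl, hv, hne'⟩ := ((pv_mem_buildSet f ls _ x).mp hx'.1).resolve_left (by simp [PySem.Set.empty])
      rw [List.any_eq_true]
      exact ⟨jl, hjl, by simp [hv, hne', hx'.2]⟩
  · intro h
    rw [List.any_eq_true] at h
    obtain ⟨jl, hjl, hc⟩ := h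
    simp only [Bool.and_eq_true, bne_iff_ne, ne_eq, List.contains_eq_mem, decide_eq_true_eq] at hc
    have hmem : pvNorm (pvGet? jl f) ∈ (ls.foldl (fun acc jl =>
        if pvNorm (pvGet? jl f) != "" then PySem.Set.add acc (pvNorm (pvGet? jl f)) else acc)
        PySem.Set.empty : PySem.Set String) :=
      (pv_mem_buildSet f ls _ _).mpr (Or.inr ⟨jl, hjl, rfl, hc.1⟩)
    have h1 : (ls.foldl (fun acc jl =>
        if pvNorm (pvGet? jl f) != "" then PySem.Set.add acc (pvNorm (pvGet? jl f)) else acc)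
        PySem.Set.empty : PySem.Set String).isEmpty = false :=
      List.isEmpty_eq_false_iff_exists_mem.mpr ⟨_, hmem⟩
    rw [if_neg (ne_true_of_eq_false h1), Bool.not_eq_eq_eq_not, Bool.not_true, List.isEmpty_eq_false_iff_exists_mem]
    refine ⟨pvNorm (pvGet? jl f), ?_⟩
    simp only [PySem.Set.inter, List.mem_filter]
    exact ⟨hmem, by simpa [PySem.Set.contains] using hc.2⟩

-- the hit dict's entry f after the whole line scan, for f a FIELD_MAP key
theorem pv_hit_getD (gt : PySem.Dict String (List String)) (ls : List (List (String × String)))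
    (hit0 : PySem.Dict String Bool) (f : String) (hf : f ∈ pvFieldMap.map Prod.fst) :
    (ls.foldl (pvHitStep gt) hit0).getD f false
      = (hit0.getD f false
          || ls.any (fun jl => pvNorm (pvGet? jl f) != "" && (gt.getD f []).contains (pvNorm (pvGet? jl f)))) := by
  rw [pv_outer_getD ls (pvHitStep gt) f
        (fun jl => pvNorm (pvGet? jl f) != "" && (gt.getD f []).contains (pvNorm (pvGet? jl f)))
        (fun h jl => pv_foldl_insert_getD pvFieldMap
          (fun k => pvNorm (pvGet? jl k) != "" && (gt.getD k []).contains (pvNorm (pvGet? jl k)))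
          h f hf (by decide)),
      pv_foldl_or]

theorem pv_ite_append {α : Type} (c : Prop) [Decidable c] (acc : List α) (x y : α) :
    (if c then acc ++ [x] else acc ++ [y]) = acc ++ [if c then x else y] := by
  split_ifs <;> rfl

theorem pv_ite_singleton {α : Type} (c : Prop) [Decidable c] (x y : α) :
    (if c then [x] else [y]) = [if c then x else y] := by
  split_ifs <;> rfl

theorem pv_ite_pair {α β : Type} (c : Prop) [Decidable c] (k : α) (x y : β) :
    (if c then (k, x) else (k, y)) = (k, if c then x else y) := by
  split_ifs <;> rfl

-- ===== VERDICT (by name: the statement is the Claim_ definition above) =====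
theorem compare_prediction_spec : Claim_equal_compare_prediction := by
  intro suggestion gt_fields _
  unfold Spec_compare_prediction compare_prediction compare_prediction_alt
  simp only [pvFieldMap, List.foldl_cons, List.foldl_nil, List.map_cons, List.map_nil]
  simp only [pv_hit_getD _ _ _ "account" (by decide), pv_hit_getD _ _ _ "cost_center" (by decide), pv_hit_getD _ _ _ "product_code" (by decide), pv_hit_getD _ _ _ "ic" (by decide), pv_hit_getD _ _ _ "project" (by decide), pv_hit_getD _ _ _ "gl_system" (by decide), pv_hit_getD _ _ _ "reserve" (by decide)]
  simp only [PySem.Dict.getD_insert, PySem.Dict.getD_empty]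
  simp only [pv_A_field]
  simp only [pv_ite_append, List.nil_append, pv_ite_singleton, pv_ite_pair]
  rfl
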